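-- pv_equiv track=rewrite | github.com/KarolNarozniak/Transcriber-german | app/main/routes.py | _dedupe_overlap
-- ===== SOURCE A (Python) =====
-- def _dedupe_overlap(existing_tail: str, new_text: str) -> str:
--     """Usuń potencjalne dublowanie na granicy fragmentów."""
--     existing_tail = existing_tail.strip()
--     new_text = new_text.lstrip()
--     # szukaj najdłuższego sufiksu istniejącego tekstu będącego prefiksem nowego
--     max_k = min(len(existing_tail), 120)
--     for k in range(max_k, 0, -1):
--         if new_text.startswith(existing_tail[-k:]):
--             return new_text[k:]
--     return new_text
-- ===== SOURCE B (Python) =====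
-- def _dedupe_overlap(existing_tail: str, new_text: str) -> str:
--     """Remove potential duplication at the fragment boundary (KMP single pass)."""
--     text = existing_tail.strip()
--     pat = new_text.lstrip()
--     m = len(pat)
--     if m == 0:
--         return pat
--     # failure table: fail[j] = longest proper border of pat[:j]  (j = 1..m)
--     fail = [0] * (m + 1)
--     j = 0
--     for i in range(1, m):
--         while j > 0 and pat[i] != pat[j]:
--             j = fail[j]
--         if pat[i] == pat[j]:
--             j += 1
--         fail[i + 1] = j
--     # one pass over the text: j = longest suffix of scanned text that is a prefix of pat
--     j = 0
--     for c in text: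
--         if j == m:
--             j = fail[j]
--         while j > 0 and c != pat[j]:
--             j = fail[j]
--         if c == pat[j]:
--             j += 1
--     # the failure chain enumerates every overlap length in decreasing order;
--     # walk it to the first one within the 120-character cap
--     while j > 120:
--         j = fail[j]
--     return pat[j:]
-- ===== Notes on version B (the rewrite author's own statement) =====
-- stated objective: alternative
-- what changed: Replaces A's descending loop that tests every candidate suffix with startswith (worst-case quadratic in the capped tail) by a KMP failure-table build over new_text and a single left-to-right scan of existing_tail, walking the failure chain to the first overlap length within the 120 cap.
import Mathlib
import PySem

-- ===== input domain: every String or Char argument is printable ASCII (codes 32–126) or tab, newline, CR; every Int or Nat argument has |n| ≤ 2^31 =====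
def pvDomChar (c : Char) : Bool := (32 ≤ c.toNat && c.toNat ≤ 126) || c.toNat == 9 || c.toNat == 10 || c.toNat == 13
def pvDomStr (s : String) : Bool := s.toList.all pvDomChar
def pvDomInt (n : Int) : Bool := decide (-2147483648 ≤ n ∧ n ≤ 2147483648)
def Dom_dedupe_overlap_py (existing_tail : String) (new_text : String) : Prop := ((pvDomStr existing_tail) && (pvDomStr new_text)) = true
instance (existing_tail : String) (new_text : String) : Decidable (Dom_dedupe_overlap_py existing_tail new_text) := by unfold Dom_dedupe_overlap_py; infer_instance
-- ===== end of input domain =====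

-- B replaces A's descending suffix-by-suffix scan with a KMP failure-table single pass
-- (objective: alternative algorithm; B returns exactly A's value on every input).

-- ===== PORT A =====
-- 'for k in range(max_k, 0, -1): if new_text.startswith(existing_tail[-k:]): return new_text[k:]'
def dedupeLoopA (t n : String) : List Int → String
  | [] => n
  | k :: ks =>
    if PySem.Str.startswith n (PySem.Str.slice t (some (-k)) none) then
      PySem.Str.slice n (some k) none
    else dedupeLoopA t n ks

def dedupe_overlap_py (existing_tail : String) (new_text : String) : String :=
  let existing_tail := PySem.Str.strip existing_tail
  let new_text := PySem.Str.lstrip new_text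
  let max_k : Int := min (PySem.Str.len existing_tail) 120
  dedupeLoopA existing_tail new_text (PySem.List.pyRange max_k 0 (-1))

-- ===== PORT B =====
-- 'while j > 0 and c != pat[j]: j = fail[j]'   (fuel = entry j; on a real run fail[j] < j)
def kmpSlide (p : List Char) (fail : Array Nat) (c : Char) : Nat → Nat → Nat
  | 0, j => j
  | fuel + 1, j =>
    if 0 < j ∧ c ≠ p.getD j ' ' then kmpSlide p fail c fuel (fail.getD j 0) else j

-- body of 'for i in range(1, m)' building the failure table
def kmpFailStep (p : List Char) (st : Array Nat × Nat) (i : Nat) : Array Nat × Nat :=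
  let j := kmpSlide p st.1 (p.getD i ' ') st.2 st.2
  let j := if p.getD i ' ' = p.getD j ' ' then j + 1 else j
  (st.1.setIfInBounds (i + 1) j, j)

-- 'fail = [0] * (m + 1); j = 0; for i in range(1, m): …'
def kmpFail (p : List Char) (m : Nat) : Array Nat :=
  ((List.range' 1 (m - 1)).foldl (kmpFailStep p) (Array.replicate (m + 1) 0, 0)).1

-- body of 'for c in text'
def kmpStep (p : List Char) (fail : Array Nat) (m : Nat) (j : Nat) (c : Char) : Nat :=
  let j := if j = m then fail.getD j 0 else j
  let j := kmpSlide p fail c j j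
  if c = p.getD j ' ' then j + 1 else j

-- 'while j > 120: j = fail[j]'   (fuel = entry j)
def kmpCap (fail : Array Nat) : Nat → Nat → Nat
  | 0, j => j
  | fuel + 1, j => if 120 < j then kmpCap fail fuel (fail.getD j 0) else j

def dedupe_overlap_py_alt (existing_tail : String) (new_text : String) : String :=
  let text := PySem.Str.strip existing_tail
  let pat := PySem.Str.lstrip new_text
  let p := pat.toList
  let m := p.length
  if m = 0 then pat
  else
    let fail := kmpFail p m
    let j := text.toList.foldl (kmpStep p fail m) 0
    let j := kmpCap fail j j
    PySem.Str.slice pat (some (j : Int)) none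

-- ===== PRECONDITION & SPEC =====
def Spec_dedupe_overlap_py (existing_tail : String) (new_text : String) (out : String) : Prop := out = dedupe_overlap_py_alt existing_tail new_text
instance (existing_tail : String) (new_text : String) (out : String) : Decidable (Spec_dedupe_overlap_py existing_tail new_text out) := by unfold Spec_dedupe_overlap_py; infer_instance

-- ===== CLAIM (what is proved, stated in full; the proofs are below) =====
def Claim_equal_dedupe_overlap_py : Prop := ∀ (existing_tail : String) (new_text : String), Dom_dedupe_overlap_py existing_tail new_text → Spec_dedupe_overlap_py existing_tail new_text (dedupe_overlap_py existing_tail new_text)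

-- ===== LEMMAS AND PROOFS =====
-- Overlap predicate: 'P.take k <:+ w' — the length-k prefix of the pattern P is a suffix of w.

lemma pv_snoc_suffix_iff (xs ys : List Char) (a c : Char) :
    (xs ++ [a] <:+ ys ++ [c]) ↔ (xs <:+ ys ∧ a = c) := by
  constructor
  · intro h
    have h2 : ((xs ++ [a]).reverse).reverse <:+ ((ys ++ [c]).reverse).reverse := by simpa using h
    rw [List.reverse_suffix] at h2
    simp only [List.reverse_append, List.reverse_cons, List.reverse_nil, List.nil_append,
      List.singleton_append] at h2
    obtain ⟨hac, hp⟩ := List.cons_prefix_cons.mp h2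
    exact ⟨List.reverse_prefix.mp (by simpa using hp), hac⟩
  · rintro ⟨⟨u, rfl⟩, rfl⟩; exact ⟨u, by simp⟩

-- A's hit test rephrased: for 1 ≤ k ≤ |T|, T[-k:] is a prefix of P iff P.take k is a suffix of T.
lemma pv_hit_iff (T P : List Char) (k : Nat) (h1 : 1 ≤ k) (hL : k ≤ T.length) :
    T.drop (T.length - k) <+: P ↔ k ≤ P.length ∧ P.take k <:+ T := by
  have hlen : (T.drop (T.length - k)).length = k := by simp [List.length_drop]; omega
  constructor
  · intro hp
    have hk : k ≤ P.length := by have := hp.length_le; omega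
    refine ⟨hk, ?_⟩
    have heq : T.drop (T.length - k) = P.take k := by
      have h2 := List.prefix_iff_eq_take.mp hp
      rw [hlen] at h2; exact h2
    rw [← heq]; exact List.drop_suffix _ _
  · rintro ⟨hk, hs⟩
    have hlen2 : (P.take k).length = k := by simp; omega
    have heq : P.take k = T.drop (T.length - k) := by
      have h2 := List.suffix_iff_eq_drop.mp hs
      rw [hlen2] at h2; exact h2
    rw [← heq]; exact List.take_prefix _ _

-- prefixes of P that are suffixes of w are nested: below j they are the borders of P.take j
lemma pv_nest (P w : List Char) (j k : Nat) (hjw : P.take j <:+ w) (hkj : k ≤ j) :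
    (P.take k <:+ w ↔ P.take k <:+ P.take j) := by
  constructor
  · intro hkw
    apply List.suffix_of_suffix_length_le hkw hjw
    simp only [List.length_take]; omega
  · intro h; exact h.trans hjw

lemma pv_snoc_iff (P w : List Char) (c : Char) (k : Nat) (h1 : 1 ≤ k) (hk : k ≤ P.length) :
    (P.take k <:+ w ++ [c]) ↔ (P.take (k - 1) <:+ w ∧ P.getD (k - 1) ' ' = c) := by
  obtain ⟨k', rfl⟩ : ∃ k', k = k' + 1 := ⟨k - 1, by omega⟩
  have hk' : k' < P.length := by omega
  have htake : P.take (k' + 1) = P.take k' ++ [P[k']] := by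
    rw [List.take_succ]; simp [List.getElem?_eq_getElem hk']
  rw [htake, Nat.add_sub_cancel, pv_snoc_suffix_iff, List.getD_eq_getElem P ' ' hk']

lemma pv_findGreatest_shrink {Q : Nat → Prop} [DecidablePred Q] (b b' : Nat) (h : b' ≤ b)
    (hle : Nat.findGreatest Q b ≤ b') : Nat.findGreatest Q b = Nat.findGreatest Q b' := by
  induction b with
  | zero => obtain rfl : b' = 0 := by omega
            rfl
  | succ b ih =>
    rcases Nat.eq_or_lt_of_le h with rfl | hlt
    · rfl
    · rw [Nat.findGreatest_succ] at hle ⊢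
      by_cases hq : Q (b + 1)
      · rw [if_pos hq] at hle; omega
      · rw [if_neg hq] at hle ⊢; exact ih (by omega) hle

lemma pv_findGreatest_congr {Q R : Nat → Prop} [DecidablePred Q] [DecidablePred R] (b : Nat)
    (h : ∀ k, k ≤ b → (Q k ↔ R k)) : Nat.findGreatest Q b = Nat.findGreatest R b := by
  induction b with
  | zero => rfl
  | succ b ih =>
    rw [Nat.findGreatest_succ, Nat.findGreatest_succ]
    have hb := h (b + 1) le_rfl
    have ih' := ih (fun k hk => h k (by omega))
    by_cases hq : Q (b + 1)
    · rw [if_pos hq, if_pos (hb.mp hq)]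
    · rw [if_neg hq, if_neg (fun hr => hq (hb.mpr hr)), ih']

-- the failure-table spec: fail[l] = length of the longest proper border of P.take l
def FailSpec (P : List Char) (fail : Array Nat) (B : Nat) : Prop :=
  ∀ l, 1 ≤ l → l ≤ B → fail.getD l 0 = Nat.findGreatest (fun k => P.take k <:+ P.take l) (l - 1)

lemma pv_slide_spec (P : List Char) (fail : Array Nat) (c : Char) (w : List Char) (B : Nat)
    (hfail : FailSpec P fail B) :
    ∀ fuel j, j ≤ fuel → j ≤ B → j < P.length → P.take j <:+ w →
      (kmpSlide P fail c fuel j) ≤ j ∧ (kmpSlide P fail c fuel j) < P.length ∧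
      P.take (kmpSlide P fail c fuel j) <:+ w ∧
      (0 < kmpSlide P fail c fuel j → c = P.getD (kmpSlide P fail c fuel j) ' ') ∧
      (∀ k, k ≤ j → P.take k <:+ w → c = P.getD k ' ' → k ≤ kmpSlide P fail c fuel j) := by
  intro fuel
  induction fuel with
  | zero =>
    intro j hj hB hlt hw
    obtain rfl : j = 0 := by omega
    simp only [kmpSlide]
    exact ⟨le_rfl, hlt, hw, by omega, fun k hk _ _ => hk⟩
  | succ fuel ih =>
    intro j hj hB hlt hw
    rw [kmpSlide]
    by_cases hcond : 0 < j ∧ c ≠ P.getD j ' '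
    · rw [if_pos hcond]
      obtain ⟨hj0, hne⟩ := hcond
      have hfj : fail.getD j 0 = Nat.findGreatest (fun k => P.take k <:+ P.take j) (j - 1) :=
        hfail j hj0 hB
      have hgt := Nat.findGreatest_eq_iff.mp hfj.symm
      have hle : fail.getD j 0 ≤ j - 1 := hgt.1
      have hjjw : P.take (fail.getD j 0) <:+ w := by
        by_cases h0 : fail.getD j 0 = 0
        · simp [h0]
        · exact (hgt.2.1 h0).trans hw
      have hrec := ih (fail.getD j 0) (by omega) (by omega) (by omega) hjjw
      obtain ⟨h1, h2, h3, h4, h5⟩ := hrec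
      refine ⟨by omega, h2, h3, h4, ?_⟩
      intro k hk hkw hkc
      by_cases hkjj : k ≤ fail.getD j 0
      · exact h5 k hkjj hkw hkc
      · exfalso
        rcases Nat.eq_or_lt_of_le hk with rfl | hklt
        · exact hne hkc
        · have hkb : P.take k <:+ P.take j := (pv_nest P w j k hw (by omega)).mp hkw
          exact absurd (hgt.2.2 (by omega) (by omega) hkb) (by simp)
    · rw [if_neg hcond]
      push_neg at hcond
      refine ⟨le_rfl, hlt, hw, fun h0 => hcond h0, fun k hk _ _ => hk⟩

-- one KMP step extends the longest-overlap state from w to w ++ [c]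
lemma pv_step_spec (P : List Char) (fail : Array Nat) (c : Char) (w : List Char) (B C : Nat)
    (hfail : FailSpec P fail B) (hC1 : 1 ≤ C) (hCm : C ≤ P.length) (hCB : C - 1 ≤ B)
    (j : Nat) (hj : j = Nat.findGreatest (fun k => P.take k <:+ w) (C - 1)) :
    (if c = P.getD (kmpSlide P fail c j j) ' ' then kmpSlide P fail c j j + 1
     else kmpSlide P fail c j j) =
      Nat.findGreatest (fun k => P.take k <:+ w ++ [c]) C := by
  have hjle : j ≤ C - 1 := hj ▸ Nat.findGreatest_le _
  have hjw : P.take j <:+ w := by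
    by_cases h0 : j = 0
    · simp [h0]
    · exact (Nat.findGreatest_eq_iff.mp hj.symm).2.1 h0
  have hjm : j < P.length := by omega
  obtain ⟨hr_le, hr_lt, hr_suf, hr_stop, hr_max⟩ :=
    pv_slide_spec P fail c w B hfail j j le_rfl (by omega) hjm hjw
  have hjmax : ∀ k, k ≤ C - 1 → P.take k <:+ w → k ≤ j := by
    intro k hk hkw
    exact hj ▸ Nat.le_findGreatest hk hkw
  by_cases hc : c = P.getD (kmpSlide P fail c j j) ' '
  · rw [if_pos hc]
    symm; rw [Nat.findGreatest_eq_iff]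
    refine ⟨by omega, fun _ => ?_, fun n hn hnC hpred => ?_⟩
    · rw [pv_snoc_iff P w c (kmpSlide P fail c j j + 1) (by omega) (by omega)]
      simpa using ⟨hr_suf, hc.symm⟩
    · rw [pv_snoc_iff P w c n (by omega) (by omega)] at hpred
      obtain ⟨hnw, hnc⟩ := hpred
      have h1 : n - 1 ≤ j := hjmax _ (by omega) hnw
      have h2 : n - 1 ≤ kmpSlide P fail c j j := hr_max _ h1 hnw hnc.symm
      omega
  · rw [if_neg hc]
    have hr0 : kmpSlide P fail c j j = 0 := by
      by_contra h
      exact hc (hr_stop (by omega))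
    rw [hr0]
    symm; rw [Nat.findGreatest_eq_iff]
    refine ⟨Nat.zero_le _, fun h => absurd rfl h, fun n hn hnC hpred => ?_⟩
    rw [pv_snoc_iff P w c n (by omega) (by omega)] at hpred
    obtain ⟨hnw, hnc⟩ := hpred
    have h1 : n - 1 ≤ j := hjmax _ (by omega) hnw
    have h2 : n - 1 ≤ kmpSlide P fail c j j := hr_max _ h1 hnw hnc.symm
    have hn1 : n = 1 := by omega
    rw [hr0] at hc
    exact hc (by rw [hn1] at hnc; simpa using hnc.symm)

lemma pv_fail_build (P : List Char) (hm : 1 ≤ P.length) :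
    ∀ d, d + 1 ≤ P.length →
      ((List.range' 1 d).foldl (kmpFailStep P) (Array.replicate (P.length + 1) 0, 0)).1.size
          = P.length + 1 ∧
      FailSpec P ((List.range' 1 d).foldl (kmpFailStep P) (Array.replicate (P.length + 1) 0, 0)).1
          (d + 1) ∧
      ((List.range' 1 d).foldl (kmpFailStep P) (Array.replicate (P.length + 1) 0, 0)).2
          = Nat.findGreatest (fun k => P.take k <:+ P.take (d + 1)) d := by
  intro d
  induction d with
  | zero =>
    intro _
    refine ⟨by simp, ?_, by simp [Nat.findGreatest]⟩
    intro l h1 h2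
    obtain rfl : l = 1 := by omega
    simp [Array.getD, Nat.findGreatest]
  | succ d ih =>
    intro hd
    obtain ⟨ihsize, ihspec, ihj⟩ := ih (by omega)
    have hrange : List.range' 1 (d + 1) = List.range' 1 d ++ [d + 1] := by
      rw [List.range'_1_concat]
      simp [Nat.add_comm]
    rw [hrange, List.foldl_append, List.foldl_cons, List.foldl_nil]
    set st := (List.range' 1 d).foldl (kmpFailStep P) (Array.replicate (P.length + 1) 0, 0) with hst
    have hidx : d + 1 < P.length := by omega
    have hchar : P.getD (d + 1) ' ' = P[d + 1] := List.getD_eq_getElem P ' ' hidx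
    have htake : P.take (d + 1) ++ [P[d + 1]] = P.take (d + 1 + 1) := by
      conv_rhs => rw [List.take_add_one]
      simp [List.getElem?_eq_getElem hidx]
    have hstep : (kmpFailStep P st (d + 1)).2
        = Nat.findGreatest (fun k => P.take k <:+ P.take (d + 1 + 1)) (d + 1) := by
      show (if P.getD (d + 1) ' ' = P.getD (kmpSlide P st.1 (P.getD (d + 1) ' ') st.2 st.2) ' '
            then kmpSlide P st.1 (P.getD (d + 1) ' ') st.2 st.2 + 1
            else kmpSlide P st.1 (P.getD (d + 1) ' ') st.2 st.2)
          = Nat.findGreatest (fun k => P.take k <:+ P.take (d + 1 + 1)) (d + 1)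
      rw [pv_step_spec P st.1 (P.getD (d + 1) ' ') (P.take (d + 1)) (d + 1) (d + 1) ihspec
        (by omega) (by omega) (by omega) st.2 (by simpa using ihj)]
      rw [hchar, htake]
    refine ⟨?_, ?_, ?_⟩
    · show ((st.1.setIfInBounds (d + 1 + 1) _)).size = P.length + 1
      rw [Array.size_setIfInBounds, ihsize]
    · intro l h1 h2
      show (st.1.setIfInBounds (d + 1 + 1) (kmpFailStep P st (d + 1)).2).getD l 0 = _
      rw [Array.getD_eq_getD_getElem?, Array.getElem?_setIfInBounds]
      by_cases hl : d + 1 + 1 = l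
      · rw [if_pos hl]
        have hin : d + 1 + 1 < st.1.size := by rw [ihsize]; omega
        rw [if_pos hin]
        subst hl
        simpa using hstep
      · rw [if_neg hl, ← Array.getD_eq_getD_getElem?]
        exact ihspec l h1 (by omega)
    · show (kmpFailStep P st (d + 1)).2 = _
      rw [hstep]

lemma pv_failSpec (P : List Char) (hm : 1 ≤ P.length) :
    FailSpec P (kmpFail P P.length) P.length := by
  have h := pv_fail_build P hm (P.length - 1) (by omega)
  have : P.length - 1 + 1 = P.length := by omega
  rw [this] at h
  unfold kmpFail
  exact h.2.1

lemma pv_scan_spec (P : List Char) (fail : Array Nat) (hm : 1 ≤ P.length)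
    (hfail : FailSpec P fail P.length) :
    ∀ (T w : List Char),
      T.foldl (kmpStep P fail P.length)
          (Nat.findGreatest (fun k => P.take k <:+ w) P.length) =
        Nat.findGreatest (fun k => P.take k <:+ w ++ T) P.length := by
  intro T
  induction T with
  | nil => intro w; simp
  | cons c T ih =>
    intro w
    rw [List.foldl_cons]
    have hj0 : (if Nat.findGreatest (fun k => P.take k <:+ w) P.length = P.length
          then fail.getD (Nat.findGreatest (fun k => P.take k <:+ w) P.length) 0
          else Nat.findGreatest (fun k => P.take k <:+ w) P.length)
        = Nat.findGreatest (fun k => P.take k <:+ w) (P.length - 1) := by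
      by_cases hje : Nat.findGreatest (fun k => P.take k <:+ w) P.length = P.length
      · rw [if_pos hje, hje, hfail P.length hm le_rfl]
        have hPw : P.take P.length <:+ w := by
          have := (Nat.findGreatest_eq_iff.mp hje).2.1 (by omega)
          exact this
        exact (pv_findGreatest_congr (P.length - 1)
          (fun k hk => pv_nest P w P.length k hPw (by omega))).symm
      · rw [if_neg hje]
        have hle : Nat.findGreatest (fun k => P.take k <:+ w) P.length ≤ P.length :=
          Nat.findGreatest_le _
        exact pv_findGreatest_shrink P.length (P.length - 1) (by omega) (by omega)
    have hstep : kmpStep P fail P.length (Nat.findGreatest (fun k => P.take k <:+ w) P.length) c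
        = Nat.findGreatest (fun k => P.take k <:+ w ++ [c]) P.length := by
      unfold kmpStep
      rw [hj0]
      exact pv_step_spec P fail c w P.length P.length hfail (by omega) le_rfl (by omega) _ rfl
    rw [hstep, ih (w ++ [c])]
    simp

lemma pv_cap_spec (P : List Char) (fail : Array Nat) (T : List Char)
    (hfail : FailSpec P fail P.length) :
    ∀ fuel j, j ≤ fuel → j ≤ P.length → P.take j <:+ T →
      Nat.findGreatest (fun k => P.take k <:+ T) (min 120 P.length) ≤ j →
      kmpCap fail fuel j = Nat.findGreatest (fun k => P.take k <:+ T) (min 120 P.length) := by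
  intro fuel
  induction fuel with
  | zero =>
    intro j hj hm hT hR
    obtain rfl : j = 0 := by omega
    simp only [kmpCap]
    omega
  | succ fuel ih =>
    intro j hj hm hT hR
    rw [kmpCap]
    by_cases hcond : 120 < j
    · rw [if_pos hcond]
      have hfj : fail.getD j 0 = Nat.findGreatest (fun k => P.take k <:+ P.take j) (j - 1) :=
        hfail j (by omega) hm
      have hgt := Nat.findGreatest_eq_iff.mp hfj.symm
      have hjjT : P.take (fail.getD j 0) <:+ T := by
        by_cases h0 : fail.getD j 0 = 0
        · simp [h0]
        · exact (hgt.2.1 h0).trans hT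
      have hRle : Nat.findGreatest (fun k => P.take k <:+ T) (min 120 P.length) ≤ fail.getD j 0 := by
        set R := Nat.findGreatest (fun k => P.take k <:+ T) (min 120 P.length) with hRdef
        by_cases hR0 : R = 0
        · omega
        · have hRpred : P.take R <:+ T := (Nat.findGreatest_eq_iff.mp hRdef.symm).2.1 hR0
          have hRb : R ≤ min 120 P.length := Nat.findGreatest_le _
          have hRj : P.take R <:+ P.take j := (pv_nest P T j R hT (by omega)).mp hRpred
          rw [hfj]
          exact Nat.le_findGreatest (by omega) hRj
      exact ih (fail.getD j 0) (by omega) (by omega) hjjT hRle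
    · rw [if_neg hcond]
      have hjR : j ≤ Nat.findGreatest (fun k => P.take k <:+ T) (min 120 P.length) :=
        Nat.le_findGreatest (by omega) hT
      omega

lemma pv_pyRange_desc_eq (C : Nat) :
    PySem.List.pyRange (C : Int) 0 (-1) = (List.range C).map (fun k : Nat => ((C : Int) - (k : Int))) := by
  unfold PySem.List.pyRange
  rw [if_neg (by decide), if_neg (by decide)]
  rcases Nat.eq_zero_or_pos C with rfl | hC
  · rw [if_neg (by simp)]
    simp
  · rw [if_pos (by exact_mod_cast hC)]
    have h3 : ((C : Int) - 0 + -(-1) - 1) / -(-1) = (C : Int) := by norm_num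
    rw [h3, Int.toNat_natCast]
    apply List.map_congr_left
    intro k _
    ring

lemma pv_pyRange_desc_cons (C : Nat) :
    PySem.List.pyRange ((C + 1 : Nat) : Int) 0 (-1) =
      ((C + 1 : Nat) : Int) :: PySem.List.pyRange (C : Int) 0 (-1) := by
  rw [pv_pyRange_desc_eq, pv_pyRange_desc_eq, List.range_succ_eq_map]
  rw [List.map_cons, List.map_map]
  refine congrArg₂ _ (by simp) ?_
  apply List.map_congr_left
  intro k _
  simp only [Function.comp_apply, Nat.succ_eq_add_one]
  push_cast
  ring

-- A's descending first-hit loop computes the greatest admissible overlap length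
lemma pv_loopA_spec (t n : String) (C : Nat) (hC : C ≤ t.toList.length) :
    dedupeLoopA t n (PySem.List.pyRange (C : Int) 0 (-1)) =
      (if Nat.findGreatest
            (fun k => k ≤ n.toList.length ∧ n.toList.take k <:+ t.toList) C = 0 then n
       else PySem.Str.slice n
          (some ((Nat.findGreatest
            (fun k => k ≤ n.toList.length ∧ n.toList.take k <:+ t.toList) C : Nat) : Int)) none) := by
  induction C with
  | zero =>
    have h0 : PySem.List.pyRange ((0 : Nat) : Int) 0 (-1) = [] := by
      rw [pv_pyRange_desc_eq]; simp
    rw [h0]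
    simp [dedupeLoopA, Nat.findGreatest]
  | succ C ih =>
    rw [pv_pyRange_desc_cons, dedupeLoopA]
    have hslice : (PySem.Str.slice t (some (-((C + 1 : Nat) : Int))) none).toList
        = t.toList.drop (t.toList.length - (C + 1)) := by
      rw [PySem.Str.toList_slice, PySem.Chars.slice_eq_listSlice]
      exact PySem.List.slice_from_neg_natCast t.toList (C + 1) (by omega)
    have hhit : PySem.Str.startswith n (PySem.Str.slice t (some (-((C + 1 : Nat) : Int))) none) = true
        ↔ ((C + 1) ≤ n.toList.length ∧ n.toList.take (C + 1) <:+ t.toList) := by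
      rw [PySem.Str.startswith_eq, PySem.Chars.startswith_iff, hslice]
      exact pv_hit_iff t.toList n.toList (C + 1) (by omega) hC
    rw [Nat.findGreatest_succ]
    by_cases hb : PySem.Str.startswith n (PySem.Str.slice t (some (-((C + 1 : Nat) : Int))) none) = true
    · rw [if_pos hb, if_pos (hhit.mp hb), if_neg (by omega)]
    · rw [if_neg hb, if_neg (fun hp => hb (hhit.mpr hp))]
      exact ih (by omega)

-- the two greatest-overlap caps coincide
lemma pv_caps_eq (T P : List Char) :
    Nat.findGreatest (fun k => k ≤ P.length ∧ P.take k <:+ T) (min T.length 120) =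
      Nat.findGreatest (fun k => P.take k <:+ T) (min 120 P.length) := by
  set K := Nat.findGreatest (fun k => k ≤ P.length ∧ P.take k <:+ T) (min T.length 120) with hK
  set R := Nat.findGreatest (fun k => P.take k <:+ T) (min 120 P.length) with hR
  have hKb : K ≤ min T.length 120 := Nat.findGreatest_le _
  have hRb : R ≤ min 120 P.length := Nat.findGreatest_le _
  have h1 : K ≤ R := by
    by_cases h0 : K = 0
    · omega
    · obtain ⟨hKm, hKs⟩ := (Nat.findGreatest_eq_iff.mp hK.symm).2.1 h0
      exact Nat.le_findGreatest (by omega) hKs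
  have h2 : R ≤ K := by
    by_cases h0 : R = 0
    · omega
    · have hRs : P.take R <:+ T := (Nat.findGreatest_eq_iff.mp hR.symm).2.1 h0
      have hRL : R ≤ T.length := by
        have := hRs.length_le
        simp only [List.length_take] at this
        omega
      exact Nat.le_findGreatest (by omega) ⟨by omega, hRs⟩
  omega

lemma pv_nil_state (P : List Char) (hm : 1 ≤ P.length) :
    Nat.findGreatest (fun k => P.take k <:+ ([] : List Char)) P.length = 0 := by
  rw [Nat.findGreatest_eq_iff]
  refine ⟨Nat.zero_le _, fun h => absurd rfl h, fun k hk hkm hp => ?_⟩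
  rw [List.suffix_nil, List.take_eq_nil_iff] at hp
  rcases hp with h | h
  · omega
  · rw [h] at hm; simp at hm

-- ===== VERDICT (by name: the statement is the Claim_ definition above) =====
set_option maxHeartbeats 1600000 in
theorem dedupe_overlap_py_spec : Claim_equal_dedupe_overlap_py := by
  unfold Claim_equal_dedupe_overlap_py
  intro e nt _
  simp only [Spec_dedupe_overlap_py, dedupe_overlap_py, dedupe_overlap_py_alt]
  set t := PySem.Str.strip e with ht
  set n := PySem.Str.lstrip nt with hn
  set T := t.toList with hT
  set P := n.toList with hP
  have hmin : min (PySem.Str.len t) 120 = ((min T.length 120 : Nat) : Int) := by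
    rw [PySem.Str.len_eq, Nat.cast_min]
    norm_cast
  rw [hmin, pv_loopA_spec t n (min T.length 120) (min_le_left _ _)]
  rw [pv_caps_eq T P]
  by_cases hm : P.length = 0
  · rw [if_pos hm]
    have hK : Nat.findGreatest (fun k => P.take k <:+ T) (min 120 P.length) = 0 := by
      have := Nat.findGreatest_le (P := fun k => P.take k <:+ T) (min 120 P.length)
      omega
    rw [hK]
    simp
  · rw [if_neg hm]
    have hm1 : 1 ≤ P.length := by omega
    have hfail := pv_failSpec P hm1
    have hinit : (0 : Nat) = Nat.findGreatest (fun k => P.take k <:+ ([] : List Char)) P.length :=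
      (pv_nil_state P hm1).symm
    have hscan : T.foldl (kmpStep P (kmpFail P P.length) P.length) 0
        = Nat.findGreatest (fun k => P.take k <:+ T) P.length := by
      rw [hinit, pv_scan_spec P (kmpFail P P.length) hm1 hfail T []]
      rfl
    rw [hscan]
    have hjle : Nat.findGreatest (fun k => P.take k <:+ T) P.length ≤ P.length :=
      Nat.findGreatest_le _
    have hjT : P.take (Nat.findGreatest (fun k => P.take k <:+ T) P.length) <:+ T := by
      by_cases h0 : Nat.findGreatest (fun k => P.take k <:+ T) P.length = 0
      · simp [h0]
      · exact (Nat.findGreatest_eq_iff.mp rfl).2.1 h0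
    have hRle : Nat.findGreatest (fun k => P.take k <:+ T) (min 120 P.length)
        ≤ Nat.findGreatest (fun k => P.take k <:+ T) P.length := by
      set R := Nat.findGreatest (fun k => P.take k <:+ T) (min 120 P.length) with hR
      by_cases h0 : R = 0
      · omega
      · have hRs : P.take R <:+ T := (Nat.findGreatest_eq_iff.mp hR.symm).2.1 h0
        have hRb : R ≤ min 120 P.length := Nat.findGreatest_le _
        exact Nat.le_findGreatest (by omega) hRs
    rw [pv_cap_spec P (kmpFail P P.length) T hfail _ _ le_rfl hjle hjT hRle]
    set R := Nat.findGreatest (fun k => P.take k <:+ T) (min 120 P.length) with hR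
    by_cases h0 : R = 0
    · rw [if_pos h0, h0]
      apply String.toList_inj.mp
      rw [PySem.Str.toList_slice, PySem.Chars.slice_eq_listSlice]
      rw [show ((0 : Nat) : Int) = ((0 : Nat) : Int) from rfl]
      rw [PySem.List.slice_from_natCast]
      simp
    · rw [if_neg h0]
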